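-- pv_equiv track=rewrite | github.com/priceg2898/data_platform | python/src/etl/mssql_to_postgresql/helper_functions.py | build_key_where_template
-- ===== SOURCE A (Python) =====
-- def build_key_where_template(key_columns):
--     conditions = []
--     for i in range(len(key_columns)):
--         parts = []
--         for j in range(i):
--             parts.append(f"{key_columns[j]} = ?")
--         parts.append(f"{key_columns[i]} > ?")
--         conditions.append("(" + " AND ".join(parts) + ")")
--     return " AND (" + " OR ".join(conditions) + ")"
-- ===== SOURCE B (Python) =====
-- def build_key_where_template(key_columns):
--     conditions = []
--     eq_parts = []
--     for col in key_columns: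
--         conditions.append("(" + " AND ".join(eq_parts + [f"{col} > ?"]) + ")")
--         eq_parts.append(f"{col} = ?")
--     return " AND (" + " OR ".join(conditions) + ")"
-- ===== Notes on version B (the rewrite author's own statement) =====
-- stated objective: faster
-- what changed: Replaces A's index-based nested loops (an inner range(i) pass rebuilding all equality parts for every column) with a single pass over key_columns that accumulates the already-seen equality conditions in a running list, avoiding the repeated rebuilds.
import Mathlib
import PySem

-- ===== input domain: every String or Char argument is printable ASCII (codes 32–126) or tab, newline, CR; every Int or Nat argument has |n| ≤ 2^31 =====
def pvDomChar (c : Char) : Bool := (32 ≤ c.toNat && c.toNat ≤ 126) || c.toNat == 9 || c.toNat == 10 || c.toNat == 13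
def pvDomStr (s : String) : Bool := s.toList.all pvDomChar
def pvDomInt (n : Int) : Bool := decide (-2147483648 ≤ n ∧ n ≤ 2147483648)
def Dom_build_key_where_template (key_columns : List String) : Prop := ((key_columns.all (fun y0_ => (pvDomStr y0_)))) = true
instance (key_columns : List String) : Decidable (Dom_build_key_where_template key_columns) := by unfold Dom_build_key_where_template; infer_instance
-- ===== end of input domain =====

-- B replaces A's index-based nested loops with a single pass that accumulates the
-- already-seen equality conditions (objective: faster by a constant factor, one pass with an accumulated prefix instead of an inner rebuild loop).

-- ===== PORT A =====
def build_key_where_template (key_columns : List String) : String :=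
  let conditions := (PySem.List.pyRange 0 (key_columns.length : Int) 1).foldl
    (fun conditions i =>
      let parts := (PySem.List.pyRange 0 i 1).foldl
        (fun parts j => parts ++ [PySem.List.pyGetD key_columns j "" ++ " = ?"]) []
      let parts := parts ++ [PySem.List.pyGetD key_columns i "" ++ " > ?"]
      conditions ++ ["(" ++ PySem.Str.join " AND " parts ++ ")"]) []
  " AND (" ++ PySem.Str.join " OR " conditions ++ ")"

-- ===== PORT B =====
def build_key_where_template_alt (key_columns : List String) : String :=
  let st := key_columns.foldl
    (fun (st : List String × List String) col =>
      (st.1 ++ ["(" ++ PySem.Str.join " AND " (st.2 ++ [col ++ " > ?"]) ++ ")"],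
       st.2 ++ [col ++ " = ?"])) ([], [])
  " AND (" ++ PySem.Str.join " OR " st.1 ++ ")"

-- ===== PRECONDITION & SPEC =====
def Spec_build_key_where_template (key_columns : List String) (out : String) : Prop := out = build_key_where_template_alt key_columns
instance (key_columns : List String) (out : String) : Decidable (Spec_build_key_where_template key_columns out) := by unfold Spec_build_key_where_template; infer_instance

-- ===== CLAIM (what is proved, stated in full; the proofs are below) =====
def Claim_equal_build_key_where_template : Prop := ∀ (key_columns : List String), Dom_build_key_where_template key_columns → Spec_build_key_where_template key_columns (build_key_where_template key_columns)

-- ===== LEMMAS AND PROOFS =====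

-- the prefix of equality parts, written as a map over an index range
theorem pv_take_map (xs : List String) (k : Nat) (hk : k ≤ xs.length) :
    (List.range k).map (fun j => xs.getD j "" ++ " = ?")
      = (xs.take k).map (fun c => c ++ " = ?") := by
  apply List.ext_getElem
  · simp [hk]
  · intro i h1 h2
    simp at h1
    simp [List.getD_eq_getElem?_getD, List.getElem?_eq_getElem (by omega : i < xs.length)]

-- A's result in closed form
theorem pv_A_eq (xs : List String) :
    build_key_where_template xs
      = " AND (" ++ PySem.Str.join " OR "
          ((List.range xs.length).map (fun i =>
            "(" ++ PySem.Str.join " AND "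
              ((xs.take i).map (fun c => c ++ " = ?") ++ [xs.getD i "" ++ " > ?"]) ++ ")")) ++ ")" := by
  unfold build_key_where_template
  rw [PySem.List.foldl_append_singleton_eq_map, PySem.List.pyRange_zero_natCast, List.map_map]
  dsimp only
  simp only [List.nil_append]
  congr 2
  congr 1
  apply List.map_congr_left
  intro k hk
  simp only [Function.comp]
  rw [PySem.List.foldl_append_singleton_eq_map, PySem.List.pyRange_zero_natCast, List.map_map]
  have hk' : k < xs.length := by simpa using hk
  rw [← pv_take_map xs k hk'.le]
  simp only [List.nil_append, Function.comp_def, PySem.List.pyGetD_natCast]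

-- B's loop invariant: after processing xs starting from (conds, eqs),
-- the accumulated state is this closed form
theorem pv_B_inv (xs : List String) (conds eqs : List String) :
    xs.foldl
      (fun (st : List String × List String) col =>
        (st.1 ++ ["(" ++ PySem.Str.join " AND " (st.2 ++ [col ++ " > ?"]) ++ ")"],
         st.2 ++ [col ++ " = ?"])) (conds, eqs)
      = (conds ++ (List.range xs.length).map (fun i =>
            "(" ++ PySem.Str.join " AND "
              (eqs ++ (xs.take i).map (fun c => c ++ " = ?") ++ [xs.getD i "" ++ " > ?"]) ++ ")"),
         eqs ++ xs.map (fun c => c ++ " = ?")) := by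
  induction xs generalizing conds eqs with
  | nil => simp
  | cons x t ih =>
    rw [List.foldl_cons, ih]
    simp only [Prod.mk.injEq]
    refine ⟨?_, by simp⟩
    rw [List.length_cons, List.range_succ_eq_map, List.map_cons, List.map_map]
    simp only [List.take_zero, List.map_nil, List.getD_cons_zero, List.append_nil,
      List.append_assoc, List.singleton_append]
    congr 2

theorem pv_B_eq (xs : List String) :
    build_key_where_template_alt xs
      = " AND (" ++ PySem.Str.join " OR "
          ((List.range xs.length).map (fun i =>
            "(" ++ PySem.Str.join " AND "
              ((xs.take i).map (fun c => c ++ " = ?") ++ [xs.getD i "" ++ " > ?"]) ++ ")")) ++ ")" := by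
  unfold build_key_where_template_alt
  rw [pv_B_inv]
  simp

-- ===== VERDICT (by name: the statement is the Claim_ definition above) =====
theorem build_key_where_template_spec : Claim_equal_build_key_where_template := by
  intro xs _
  unfold Spec_build_key_where_template
  rw [pv_A_eq, pv_B_eq]
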